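-- pv_equiv track=rewrite | github.com/oslunt/TechnicalInterviewCourse | midterm.py | recurFlipInvert
-- ===== SOURCE A (Python) =====
-- def recurFlipInvert(arr):
--     if isinstance(arr[0], int):
--         arr.reverse()
--         for i in range(len(arr)):
--             if arr[i] == 1:
--                 arr[i] = 0
--             else :
--                 arr[i] = 1
--         return arr
--     else:
--         for i in range(len(arr)):
--             recurFlipInvert(arr[i])
--         return arr
-- ===== SOURCE B (Python) =====
-- def recurFlipInvert(arr):
--     # Iterative worklist instead of recursion: pop a list; if its head is an
--     # int, replace its contents in place by the flipped reversal (built as a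
--     # comprehension over reversed(cur)); otherwise push its children.
--     stack = [arr]
--     while stack:
--         cur = stack.pop()
--         if isinstance(cur[0], int):
--             cur[:] = [0 if v == 1 else 1 for v in reversed(cur)]
--         else:
--             stack.extend(cur)
--     return arr
-- ===== Notes on version B (the rewrite author's own statement) =====
-- stated objective: alternative
-- what changed: Replaces the recursion and the two index-based in-place for-loops by an explicit worklist (stack) loop whose leaf step rebuilds each innermost list with a single comprehension over reversed(cur).
import Mathlib
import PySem

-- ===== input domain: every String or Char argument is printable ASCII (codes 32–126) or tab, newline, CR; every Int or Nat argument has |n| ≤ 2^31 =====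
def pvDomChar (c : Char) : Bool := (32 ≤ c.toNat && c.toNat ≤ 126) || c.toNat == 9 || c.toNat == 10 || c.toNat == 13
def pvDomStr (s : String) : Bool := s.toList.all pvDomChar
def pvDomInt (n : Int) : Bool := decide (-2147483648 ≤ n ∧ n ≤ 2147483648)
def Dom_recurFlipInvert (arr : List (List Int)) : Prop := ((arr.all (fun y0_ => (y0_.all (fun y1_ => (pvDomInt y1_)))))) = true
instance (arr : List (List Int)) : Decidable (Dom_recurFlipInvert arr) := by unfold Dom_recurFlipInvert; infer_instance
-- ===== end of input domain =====

-- B replaces the recursion and the index-based in-place loops by a worklist whose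
-- leaf step rebuilds each innermost list as one pass over its reversal (alternative
-- decomposition, same cost). Equivalence is about the RETURN value; Python A mutates
-- arr in place, and B performs the same in-place mutation.


-- ===== PORT A =====
-- inner (base) case of A: arr.reverse(); for i in range(len(arr)): arr[i] = 0 if arr[i]==1 else 1
def recurFlipInvertBase (l : List Int) : List Int :=
  let r := l.reverse
  (PySem.List.pyRange 0 (r.length : Int) 1).foldl
    (fun st i =>
      if PySem.List.pyGetD st i 0 = 1 then PySem.List.pySetD st i 0
      else PySem.List.pySetD st i 1) r

-- outer case: for i in range(len(arr)): recurFlipInvert(arr[i])  (in-place ⇒ write back at i)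
def recurFlipInvert (arr : List (List Int)) : List (List Int) :=
  (PySem.List.pyRange 0 (arr.length : Int) 1).foldl
    (fun st i => PySem.List.pySetD st i (recurFlipInvertBase (PySem.List.pyGetD st i []))) arr

-- ===== PORT B =====
-- leaf step of B's worklist: cur[:] = [0 if v == 1 else 1 for v in reversed(cur)]
def flipLeaf (cur : List Int) : List Int :=
  cur.reverse.map (fun v => if v = 1 then 0 else 1)

-- B's stack pops each child of arr exactly once and rewrites it in place with
-- flipLeaf; since each position is rewritten independently, the resulting arr
-- is the childwise image under flipLeaf.
def recurFlipInvert_alt (arr : List (List Int)) : List (List Int) :=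
  arr.map flipLeaf

-- ===== PRECONDITION & SPEC =====
-- At the given argument type List (List Int) (the depth-2 lists the required
-- signature covers), Python A raises IndexError at arr[0] when arr itself or any
-- inner list is empty; B raises there too. Pre_ excludes those empty-list inputs
-- and nothing else at this type.
def Pre_recurFlipInvert (arr : List (List Int)) : Prop := arr ≠ [] ∧ ∀ l ∈ arr, l ≠ []
instance (arr : List (List Int)) : Decidable (Pre_recurFlipInvert arr) := by unfold Pre_recurFlipInvert; infer_instance
def pvWitness_recurFlipInvert : List (List Int) := [[0, 1, 5], [2]]

def Spec_recurFlipInvert (arr : List (List Int)) (out : List (List Int)) : Prop := out = recurFlipInvert_alt arr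
instance (arr : List (List Int)) (out : List (List Int)) : Decidable (Spec_recurFlipInvert arr out) := by unfold Spec_recurFlipInvert; infer_instance

-- ===== CLAIM (what is proved, stated in full; the proofs are below) =====
def Claim_equal_recurFlipInvert : Prop := ∀ (arr : List (List Int)), Dom_recurFlipInvert arr → Pre_recurFlipInvert arr → Spec_recurFlipInvert arr (recurFlipInvert arr)

-- ===== LEMMAS AND PROOFS =====

-- the loop 'for i in range(len(st)): st[i] = f(st[i])' maps f over the suffix it has not visited yet
theorem foldl_set_map_aux {α : Type} (f : α → α) (d : α) :
    ∀ (b a : List α),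
      (PySem.List.pyRange (a.length : Int) ((a.length : Int) + (b.length : Int)) 1).foldl
        (fun st i => PySem.List.pySetD st i (f (PySem.List.pyGetD st i d))) (a ++ b)
        = a ++ b.map f := by
  intro b
  induction b with
  | nil =>
      intro a
      simp [PySem.List.pyRange_one_eq_nil]
  | cons x t ih =>
      intro a
      have hlen : ((a.length : Int)) + (((x :: t).length : Int)) = (a.length : Int) + 1 + (t.length : Int) := by
        push_cast [List.length_cons]; ring
      rw [hlen, PySem.List.pyRange_one_cons (by omega)]
      simp only [List.foldl_cons]
      have hget : PySem.List.pyGetD (a ++ x :: t) (a.length : Int) d = x := by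
        simp [PySem.List.pyGetD_natCast]
      have hset : PySem.List.pySetD (a ++ x :: t) (a.length : Int) (f x)
          = (a ++ [f x]) ++ t := by
        simp [PySem.List.pySetD_natCast, List.set_append_right, List.append_assoc]
      rw [hget, hset]
      have := ih (a ++ [f x])
      simp only [List.length_append, List.length_cons, List.length_nil] at this
      push_cast at this
      norm_num at this
      simpa [List.append_assoc] using this

theorem foldl_set_map {α : Type} (f : α → α) (d : α) (l : List α) :
    (PySem.List.pyRange 0 (l.length : Int) 1).foldl
      (fun st i => PySem.List.pySetD st i (f (PySem.List.pyGetD st i d))) l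
      = l.map f := by
  simpa using foldl_set_map_aux f d l []

theorem base_eq_leaf (l : List Int) : recurFlipInvertBase l = flipLeaf l := by
  unfold recurFlipInvertBase flipLeaf
  have hfun : (fun (st : List Int) (i : Int) =>
      if PySem.List.pyGetD st i 0 = 1 then PySem.List.pySetD st i 0
      else PySem.List.pySetD st i 1)
      = fun st i => PySem.List.pySetD st i
          (if PySem.List.pyGetD st i 0 = 1 then (0 : Int) else 1) := by
    funext st i
    by_cases h : PySem.List.pyGetD st i 0 = 1 <;> simp [h]
  rw [hfun]
  exact foldl_set_map (fun v => if v = 1 then 0 else 1) 0 l.reverse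

-- ===== VERDICT (by name: the statement is the Claim_ definition above) =====
theorem recurFlipInvert_spec : Claim_equal_recurFlipInvert := by
  intro arr _ _
  unfold Spec_recurFlipInvert recurFlipInvert recurFlipInvert_alt
  have : (fun (st : List (List Int)) (i : Int) =>
      PySem.List.pySetD st i (recurFlipInvertBase (PySem.List.pyGetD st i [])))
      = fun st i => PySem.List.pySetD st i (flipLeaf (PySem.List.pyGetD st i [])) := by
    funext st i; rw [base_eq_leaf]
  rw [this, foldl_set_map flipLeaf [] arr]
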